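-- pv_equiv track=rewrite | github.com/paulguy/uncrustygame | header_doc.py | _strlist_to_html
-- ===== SOURCE A (Python) =====
-- def _strlist_to_html(strlist):
--     text = "<p>"
--     for item in strlist:
--         if len(item.lstrip().rstrip()) == 0:
--             text += "</p><p>"
--         else:
--             text += "{} ".format(item)
--     text += "</p>"
--
--     return text
-- ===== SOURCE B (Python) =====
-- # Two-stage re-implementation: first partition the list into paragraph groups
-- # (a new group per blank item), then render each group and join with </p><p>.
-- def _strlist_to_html(strlist):
--     groups = [[]]
--     for item in strlist:
--         if item.strip() == "":
--             groups.append([])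
--         else:
--             groups[-1].append(item)
--     rendered = ["".join(w + " " for w in g) for g in groups]
--     return "<p>" + "</p><p>".join(rendered) + "</p>"
-- ===== Notes on version B (the rewrite author's own statement) =====
-- stated objective: alternative
-- what changed: Replaces A's single pass that emits HTML tokens inline with a two-stage pipeline: recursively partition the list into paragraph groups at blank items, render each group, then join the renderings with '</p><p>'.
import Mathlib
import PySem

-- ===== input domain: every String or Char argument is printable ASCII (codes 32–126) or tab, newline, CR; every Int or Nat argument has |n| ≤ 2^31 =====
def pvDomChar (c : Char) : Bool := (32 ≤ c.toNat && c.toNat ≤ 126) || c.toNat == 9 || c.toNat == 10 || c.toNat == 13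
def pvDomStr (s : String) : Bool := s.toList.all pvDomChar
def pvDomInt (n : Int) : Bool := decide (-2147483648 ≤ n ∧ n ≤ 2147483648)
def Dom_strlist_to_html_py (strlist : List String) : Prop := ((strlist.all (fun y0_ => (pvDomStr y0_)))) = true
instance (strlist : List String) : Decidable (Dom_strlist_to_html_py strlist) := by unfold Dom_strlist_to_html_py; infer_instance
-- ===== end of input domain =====

-- B restructures A's single emitting pass into partition-into-groups + render + join; same output, same cost (objective: alternative).

-- ===== PORT A =====
-- text = "<p>"; for item in strlist: blank → text += "</p><p>" else text += item + " "; text += "</p>"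
def strlist_to_html_py (strlist : List String) : String :=
  let text := "<p>"
  let text := strlist.foldl (fun text item =>
    if PySem.Str.len (PySem.Str.rstrip (PySem.Str.lstrip item)) = 0 then
      text ++ "</p><p>"
    else
      text ++ (item ++ " ")) text
  text ++ "</p>"

-- ===== PORT B =====
-- groups = [[]]; for item: blank → groups.append([]) else groups[-1].append(item)
def pvGroupStep (groups : List (List String)) (item : String) : List (List String) :=
  if PySem.Str.strip item = "" then
    groups ++ [[]]
  else
    groups.dropLast ++ [PySem.List.pyGetD groups (-1) [] ++ [item]]

-- "".join(w + " " for w in g)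
def pvRenderGroup (g : List String) : String :=
  PySem.Str.join "" (g.map (fun w => w ++ " "))

def strlist_to_html_py_alt (strlist : List String) : String :=
  let groups := strlist.foldl pvGroupStep [[]]
  "<p>" ++ PySem.Str.join "</p><p>" (groups.map pvRenderGroup) ++ "</p>"

-- ===== PRECONDITION & SPEC =====
def Spec_strlist_to_html_py (strlist : List String) (out : String) : Prop := out = strlist_to_html_py_alt strlist
instance (strlist : List String) (out : String) : Decidable (Spec_strlist_to_html_py strlist out) := by unfold Spec_strlist_to_html_py; infer_instance

-- ===== CLAIM (what is proved, stated in full; the proofs are below) =====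
def Claim_equal_strlist_to_html_py : Prop := ∀ (strlist : List String), Dom_strlist_to_html_py strlist → Spec_strlist_to_html_py strlist (strlist_to_html_py strlist)

-- ===== LEMMAS AND PROOFS =====

-- A's blank test (len(item.lstrip().rstrip()) == 0) agrees with B's (item.strip() == "")
theorem pvBlank_iff (s : String) :
    (PySem.Str.len (PySem.Str.rstrip (PySem.Str.lstrip s)) = 0) ↔ PySem.Str.strip s = "" := by
  rw [PySem.Str.len_eq, PySem.Str.toList_rstrip, PySem.Str.toList_lstrip]
  rw [← String.toList_inj]
  simp [PySem.Str.toList_strip, PySem.Chars.strip]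

-- proof-side recursive view of B's grouping loop
def pvParaGroups : List String → List (List String)
  | [] => [[]]
  | x :: xs =>
    if PySem.Str.strip x = "" then
      [] :: pvParaGroups xs
    else
      match pvParaGroups xs with
      | [] => [[x]]
      | g :: gs => (x :: g) :: gs

theorem pvParaGroups_ne_nil (l : List String) : pvParaGroups l ≠ [] := by
  induction l with
  | nil => simp [pvParaGroups]
  | cons x xs ih =>
    simp only [pvParaGroups]
    split
    · simp
    · cases h : pvParaGroups xs with
      | nil => exact absurd h ih
      | cons g gs => simp

-- tail-accumulating view of the same grouping
def pvAux (g : List String) : List String → List (List String)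
  | [] => [g]
  | x :: xs =>
    if PySem.Str.strip x = "" then g :: pvAux [] xs else pvAux (g ++ [x]) xs

theorem pvFoldl_groupStep (l : List String) :
    ∀ (gs : List (List String)) (g : List String),
      l.foldl pvGroupStep (gs ++ [g]) = gs ++ pvAux g l := by
  induction l with
  | nil => intro gs g; simp [pvAux]
  | cons x xs ih =>
    intro gs g
    by_cases hb : PySem.Str.strip x = ""
    · have e : pvGroupStep (gs ++ [g]) x = (gs ++ [g]) ++ [[]] := by
        simp [pvGroupStep, hb]
      rw [List.foldl_cons, e, ih (gs ++ [g]) []]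
      simp [pvAux, hb]
    · have e : pvGroupStep (gs ++ [g]) x = gs ++ [g ++ [x]] := by
        simp [pvGroupStep, hb, PySem.List.pyGetD, PySem.List.pyGet?_neg_one_append_singleton]
      rw [List.foldl_cons, e, ih gs (g ++ [x])]
      simp [pvAux, hb]

theorem pvAux_eq (l : List String) :
    ∀ g : List String,
      pvAux g l = match pvParaGroups l with
                  | [] => [g]
                  | h :: t => (g ++ h) :: t := by
  induction l with
  | nil => intro g; simp [pvAux, pvParaGroups]
  | cons x xs ih =>
    intro g
    by_cases hb : PySem.Str.strip x = ""
    · simp only [pvAux, pvParaGroups, if_pos hb, ih []]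
      cases h : pvParaGroups xs with
      | nil => exact absurd h (pvParaGroups_ne_nil xs)
      | cons h t => simp
    · simp only [pvAux, pvParaGroups, if_neg hb, ih (g ++ [x])]
      cases h : pvParaGroups xs with
      | nil => exact absurd h (pvParaGroups_ne_nil xs)
      | cons h t => simp

theorem pvFoldl_eq_paraGroups (l : List String) :
    l.foldl pvGroupStep [[]] = pvParaGroups l := by
  have := pvFoldl_groupStep l [] []
  simp only [List.nil_append] at this
  rw [this, pvAux_eq]
  cases h : pvParaGroups l with
  | nil => exact absurd h (pvParaGroups_ne_nil l)
  | cons g gs => simp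

-- A's loop body, rephrased as front-building recursion (list-of-chars level)
def pvBodyA : List String → List Char
  | [] => []
  | x :: xs =>
    (if PySem.Str.strip x = "" then "</p><p>".toList else x.toList ++ " ".toList) ++ pvBodyA xs

theorem pvFoldl_eq_bodyA (l : List String) (acc : String) :
    (l.foldl (fun text item =>
      if PySem.Str.len (PySem.Str.rstrip (PySem.Str.lstrip item)) = 0 then
        text ++ "</p><p>"
      else
        text ++ (item ++ " ")) acc).toList = acc.toList ++ pvBodyA l := by
  induction l generalizing acc with
  | nil => simp [pvBodyA]
  | cons x xs ih =>
    simp only [List.foldl_cons, pvBodyA]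
    rw [ih]
    by_cases h : PySem.Str.strip x = ""
    · rw [if_pos ((pvBlank_iff x).mpr h), if_pos h]
      simp [String.toList_append]
    · rw [if_neg (fun hl => h ((pvBlank_iff x).mp hl)), if_neg h]
      simp [String.toList_append]

theorem pvJoin_nil_sep (l : List (List Char)) :
    PySem.Chars.join ([] : List Char) l = l.flatten := by
  induction l with
  | nil => rfl
  | cons x t ih =>
    cases t with
    | nil => simp [PySem.Chars.join, List.intercalate]
    | cons y ys =>
      rw [PySem.Chars.join_cons_cons, ih]
      simp

theorem pvRenderGroup_toList (g : List String) :
    (pvRenderGroup g).toList = (g.map (fun w => w.toList ++ [' '])).flatten := by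
  simp [pvRenderGroup, PySem.Str.toList_join, pvJoin_nil_sep, Function.comp_def,
    String.toList_append]

theorem pvBodyA_eq_join (l : List String) :
    pvBodyA l = (PySem.Str.join "</p><p>" ((pvParaGroups l).map pvRenderGroup)).toList := by
  induction l with
  | nil =>
    simp [pvBodyA, pvParaGroups, pvRenderGroup_toList, PySem.Str.toList_join,
      PySem.Chars.join_singleton]
  | cons x xs ih =>
    cases h : pvParaGroups xs with
    | nil => exact absurd h (pvParaGroups_ne_nil xs)
    | cons g gs =>
      rw [h] at ih
      by_cases hb : PySem.Str.strip x = ""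
      · have e1 : pvBodyA (x :: xs) = "</p><p>".toList ++ pvBodyA xs := by
          simp [pvBodyA, hb]
        have e2 : pvParaGroups (x :: xs) = [] :: g :: gs := by
          simp [pvParaGroups, hb, h]
        rw [e1, e2, ih]
        simp [PySem.Str.toList_join, PySem.Chars.join_cons_cons, pvRenderGroup_toList]
      · have e1 : pvBodyA (x :: xs) = (x.toList ++ " ".toList) ++ pvBodyA xs := by
          simp [pvBodyA, hb]
        have e2 : pvParaGroups (x :: xs) = (x :: g) :: gs := by
          simp [pvParaGroups, hb, h]
        rw [e1, e2, ih]
        cases gs with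
        | nil =>
          simp [PySem.Str.toList_join, PySem.Chars.join_singleton, pvRenderGroup_toList]
        | cons g2 gs2 =>
          simp [PySem.Str.toList_join, PySem.Chars.join_cons_cons, pvRenderGroup_toList]

-- ===== VERDICT (by name: the statement is the Claim_ definition above) =====
theorem strlist_to_html_py_spec : Claim_equal_strlist_to_html_py := by
  intro strlist _
  unfold Spec_strlist_to_html_py strlist_to_html_py strlist_to_html_py_alt
  rw [← String.toList_inj]
  simp only [String.toList_append, pvFoldl_eq_bodyA, pvFoldl_eq_paraGroups, pvBodyA_eq_join]
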